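-- pv_equiv track=rewrite | github.com/Viddlox/skyscrapper-solver-ultima | src/skyscraper/grid_manager.py | count_visible_reverse
-- ===== SOURCE A (Python) =====
-- def count_visible_reverse(perm: "Permutation") -> int:
--     visible, max_height = 0, 0
--     for i in range(len(perm) - 1, -1, -1):
--         height = perm[i]
--         if height > max_height:
--             visible += 1
--             max_height = height
--     return visible
-- ===== SOURCE B (Python) =====
-- def count_visible_reverse(perm: "Permutation") -> int:
--     n = len(perm)
--     return sum(
--         1
--         for i, h in enumerate(perm)
--         if h > 0 and all(h > perm[j] for j in range(i + 1, n))
--     )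
-- ===== Notes on version B (the rewrite author's own statement) =====
-- stated objective: alternative
-- what changed: Replaces the right-to-left running-max loop by a direct definition of visibility: one comprehension counting positions whose positive height exceeds every later height (short-circuiting inner scan).
import Mathlib
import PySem

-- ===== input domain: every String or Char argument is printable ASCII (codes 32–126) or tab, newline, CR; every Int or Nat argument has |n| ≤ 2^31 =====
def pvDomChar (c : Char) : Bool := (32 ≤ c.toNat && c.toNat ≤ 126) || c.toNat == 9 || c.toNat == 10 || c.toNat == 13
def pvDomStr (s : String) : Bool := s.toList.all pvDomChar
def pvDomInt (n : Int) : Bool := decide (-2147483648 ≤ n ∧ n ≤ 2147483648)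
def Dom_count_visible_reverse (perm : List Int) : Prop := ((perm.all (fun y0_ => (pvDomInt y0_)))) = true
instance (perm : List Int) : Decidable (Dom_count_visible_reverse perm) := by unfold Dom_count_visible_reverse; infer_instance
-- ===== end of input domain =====

-- B replaces A's right-to-left running-max loop by a direct count of positions whose
-- positive height exceeds every later height (alternative algorithm, not faster).


-- ===== PORT A =====
-- for i in range(len(perm)-1, -1, -1): height = perm[i]; if height > max_height: …
-- (index i is always in range, so perm[i] is ported as pyGetD with default 0)
def count_visible_reverse (perm : List Int) : Int :=
  ((PySem.List.pyRange (PySem.List.len perm - 1) (-1) (-1)).foldl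
    (fun (s : Int × Int) i =>
      let height := PySem.List.pyGetD perm i 0
      if height > s.2 then (s.1 + 1, height) else s)
    (0, 0)).1

-- ===== PORT B =====
-- n = len(perm); sum(1 for i, h in enumerate(perm) if h > 0 and all(h > perm[j] for j in range(i+1, n)))
def count_visible_reverse_alt (perm : List Int) : Int :=
  let n := PySem.List.len perm
  ((PySem.List.enumerate perm).map
    (fun p => if p.2 > 0 && (PySem.List.pyRange (p.1 + 1) n 1).all (fun j => decide (p.2 > PySem.List.pyGetD perm j 0))
              then (1 : Int) else 0)).sum

-- ===== PRECONDITION & SPEC =====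
def Spec_count_visible_reverse (perm : List Int) (out : Int) : Prop := out = count_visible_reverse_alt perm
instance (perm : List Int) (out : Int) : Decidable (Spec_count_visible_reverse perm out) := by unfold Spec_count_visible_reverse; infer_instance

-- ===== CLAIM (what is proved, stated in full; the proofs are below) =====
def Claim_equal_count_visible_reverse : Prop := ∀ (perm : List Int), Dom_count_visible_reverse perm → Spec_count_visible_reverse perm (count_visible_reverse perm)

-- ===== LEMMAS AND PROOFS =====

-- structural form of B's count: at each head, 1 iff it is positive and beats every later element
def cvrB : List Int → Int
  | [] => 0
  | h :: t => (if h > 0 && t.all (fun x => decide (h > x)) then (1 : Int) else 0) + cvrB t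

-- running max (with initial 0) of a list, as A's loop maintains it from the right
def cvrM (xs : List Int) : Int := xs.foldr max 0

theorem gt_cvrM_iff (h : Int) (t : List Int) :
    cvrM t < h ↔ (h > 0 && t.all (fun x => decide (h > x))) = true := by
  induction t with
  | nil => simp [cvrM]
  | cons a t ih =>
    simp only [cvrM, List.foldr_cons, List.all_cons, Bool.and_eq_true, decide_eq_true_eq] at ih ⊢
    constructor
    · intro hlt
      have h1 : a < h := lt_of_le_of_lt (le_max_left _ _) hlt
      have h2 : List.foldr max 0 t < h := lt_of_le_of_lt (le_max_right _ _) hlt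
      rcases ih.mp h2 with ⟨hp, hall⟩
      exact ⟨hp, h1, hall⟩
    · rintro ⟨hp, h1, hall⟩
      exact max_lt h1 ((ih.mpr ⟨hp, hall⟩))

-- A's foldr-step computes (cvrB, cvrM)
theorem foldr_step_eq (xs : List Int) :
    xs.foldr (fun h (s : Int × Int) => if h > s.2 then (s.1 + 1, h) else s) (0, 0)
      = (cvrB xs, cvrM xs) := by
  induction xs with
  | nil => simp [cvrB, cvrM]
  | cons h t ih =>
    simp only [List.foldr_cons, ih, cvrB]
    by_cases hc : cvrM t < h
    · have hb := (gt_cvrM_iff h t).mp hc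
      have hm : cvrM (h :: t) = h := by
        simp only [cvrM, List.foldr_cons]
        exact max_eq_left (le_of_lt hc)
      rw [if_pos hc, hm, hb]
      simp [add_comm]
    · have hb : (h > 0 && t.all (fun x => decide (h > x))) = false := by
        rcases Bool.eq_false_or_eq_true (h > 0 && t.all (fun x => decide (h > x))) with hf | htr
        · exact absurd ((gt_cvrM_iff h t).mpr hf) hc
        · exact htr
      have hm : cvrM (h :: t) = cvrM t := by
        simp only [cvrM, List.foldr_cons]
        exact max_eq_right (not_lt.mp hc)
      rw [if_neg hc, hm, hb]
      simp

-- A's index loop over range(n-1, -1, -1) equals the structural foldr over the list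
theorem foldrA_eq (xs : List Int) :
    (PySem.List.pyRange 0 (xs.length : Int) 1).foldr
      (fun i (s : Int × Int) =>
        let height := PySem.List.pyGetD xs i 0
        if height > s.2 then (s.1 + 1, height) else s) (0, 0)
      = xs.foldr (fun h (s : Int × Int) => if h > s.2 then (s.1 + 1, h) else s) (0, 0) := by
  conv_rhs => rw [← PySem.List.map_pyGetD_pyRange_zero' (xs := xs) (d := 0)]
  rw [List.foldr_map]

-- B's enumerate/slice form equals the structural count, generalized over the start index
theorem enum_sum_eq (full : List Int) :
    ∀ (ys : List Int) (n : Nat), full.drop n = ys →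
    ((PySem.List.enumerate ys (n : Int)).map
      (fun p => if p.2 > 0 && (PySem.List.pyRange (p.1 + 1) (full.length : Int) 1).all
                  (fun j => decide (p.2 > PySem.List.pyGetD full j 0))
                then (1 : Int) else 0)).sum = cvrB ys := by
  intro ys
  induction ys with
  | nil => intro n _; simp [PySem.List.enumerate, cvrB]
  | cons h t ih =>
    intro n hdrop
    have hcast : (n : Int) + 1 = ((n + 1 : Nat) : Int) := by push_cast; ring
    have ht : full.drop (n + 1) = t := by
      rw [← List.tail_drop, hdrop, List.tail_cons]
    have hall : (PySem.List.pyRange ((n : Int) + 1) (full.length : Int) 1).all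
        (fun j => decide (h > PySem.List.pyGetD full j 0)) = t.all (fun x => decide (h > x)) := by
      rw [show (fun j => decide (h > PySem.List.pyGetD full j 0))
            = (fun x => decide (h > x)) ∘ (fun j => PySem.List.pyGetD full j 0) from rfl,
          ← List.all_map, hcast,
          PySem.List.map_pyGetD_pyRange' full 0 (a := ((n + 1 : Nat) : Int)) (by positivity)]
      simp only [Int.toNat_natCast]
      rw [ht]
    rw [PySem.List.enumerate_cons, List.map_cons, List.sum_cons, cvrB]
    simp only [hall]
    rw [hcast, ih (n + 1) ht]

-- ===== VERDICT (by name: the statement is the Claim_ definition above) =====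
theorem count_visible_reverse_spec : Claim_equal_count_visible_reverse := by
  intro perm _
  unfold Spec_count_visible_reverse count_visible_reverse count_visible_reverse_alt
  simp only [PySem.List.len_eq]
  have hr : PySem.List.pyRange ((perm.length : Int) - 1) (-1) (-1)
      = (PySem.List.pyRange 0 (perm.length : Int) 1).reverse := by
    rw [PySem.List.pyRange_neg_one_eq_reverse]; norm_num
  rw [hr, List.foldl_reverse, foldrA_eq, foldr_step_eq]
  exact (enum_sum_eq perm perm 0 rfl).symm
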